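-- pv_equiv track=rewrite | github.com/chanh1311/Python_Basic_200 | Kteam/tuple_max.py | max_tuple
-- ===== SOURCE A (Python) =====
-- def max_tuple(tupleA):
--     count = len(tupleA)
--     max_item = tupleA[0]
--     min_item = tupleA[0]
--     for i in tupleA:
--         if i > max_item:
--             max_item = i
--         elif i < min_item:
--             min_item = i
--     return max_item, min_item, count
-- ===== SOURCE B (Python) =====
-- def max_tuple(tupleA):
--     return max(tupleA), min(tupleA), len(tupleA)
-- ===== Notes on version B (the rewrite author's own statement) =====
-- stated objective: idiomatic
-- what changed: Replaces the single fused scan that threads a (max,min) pair through an if/elif loop with three independent built-in reductions: max(), min() and len().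
import Mathlib
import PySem

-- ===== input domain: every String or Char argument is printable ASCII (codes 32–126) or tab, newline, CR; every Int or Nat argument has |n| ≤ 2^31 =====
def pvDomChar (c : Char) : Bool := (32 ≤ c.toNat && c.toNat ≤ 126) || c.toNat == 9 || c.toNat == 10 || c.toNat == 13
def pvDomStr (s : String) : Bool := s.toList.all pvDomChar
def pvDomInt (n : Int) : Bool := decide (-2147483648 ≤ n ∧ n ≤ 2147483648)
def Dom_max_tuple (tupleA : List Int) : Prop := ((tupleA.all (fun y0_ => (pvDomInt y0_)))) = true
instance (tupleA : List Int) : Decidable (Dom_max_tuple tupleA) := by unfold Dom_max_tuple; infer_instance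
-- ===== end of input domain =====

-- B replaces A's fused single-pass max/min loop by three independent built-in
-- reductions (max, min, len); objective: idiomatic. Both raise on the empty tuple
-- (A IndexError, B ValueError), so Pre_ excludes only tupleA = [].

-- ===== PORT A =====
-- one fused loop carrying (max_item, min_item); empty input excluded by Pre_
def max_tuple (tupleA : List Int) : Int × Int × Int :=
  match tupleA with
  | [] => (0, 0, 0)   -- unreachable under Pre_ (Python raises IndexError at tupleA[0])
  | h :: _ =>
    let count : Int := tupleA.length
    let s := tupleA.foldl
      (fun (st : Int × Int) i =>
        if i > st.1 then (i, st.2)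
        else if i < st.2 then (st.1, i)
        else st)
      (h, h)
    (s.1, s.2, count)

-- ===== PORT B =====
-- max(tupleA), min(tupleA), len(tupleA) as three independent reductions
def max_tuple_alt (tupleA : List Int) : Int × Int × Int :=
  match PySem.List.max? tupleA (fun x => x), PySem.List.min? tupleA (fun x => x) with
  | some mx, some mn => (mx, mn, (tupleA.length : Int))
  | _, _ => (0, 0, 0)   -- unreachable under Pre_ (Python max/min raise ValueError on [])

-- ===== PRECONDITION & SPEC =====
-- Pre_ excludes only the empty list, on which both Pythons raise.
def Pre_max_tuple (tupleA : List Int) : Prop := tupleA ≠ []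
instance (tupleA : List Int) : Decidable (Pre_max_tuple tupleA) := by unfold Pre_max_tuple; infer_instance
def pvWitness_max_tuple : List Int := [3, -1, 7, 7, 0]

def Spec_max_tuple (tupleA : List Int) (out : Int × Int × Int) : Prop := out = max_tuple_alt tupleA
instance (tupleA : List Int) (out : Int × Int × Int) : Decidable (Spec_max_tuple tupleA out) := by unfold Spec_max_tuple; infer_instance

-- ===== CLAIM (what is proved, stated in full; the proofs are below) =====
def Claim_equal_max_tuple : Prop := ∀ (tupleA : List Int), Dom_max_tuple tupleA → Pre_max_tuple tupleA → Spec_max_tuple tupleA (max_tuple tupleA)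

-- ===== LEMMAS AND PROOFS =====

-- A's fused loop computes the pair of the two independent fold reductions.
theorem fused_fold_eq (t : List Int) (mx mn : Int) (h : mn ≤ mx) :
    t.foldl
      (fun (st : Int × Int) i =>
        if i > st.1 then (i, st.2)
        else if i < st.2 then (st.1, i)
        else st)
      (mx, mn)
    = (t.foldl max mx, t.foldl min mn) := by
  induction t generalizing mx mn with
  | nil => rfl
  | cons a t ih =>
    simp only [List.foldl_cons]
    by_cases h1 : a > mx
    · simp only [if_pos h1]
      have hmax : max mx a = a := by omega
      have hmin : min mn a = mn := by omega
      rw [hmax, hmin]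
      exact ih a mn (by omega)
    · simp only [if_neg h1]
      by_cases h2 : a < mn
      · simp only [if_pos h2]
        have hmax : max mx a = mx := by omega
        have hmin : min mn a = a := by omega
        rw [hmax, hmin]
        exact ih mx a (by omega)
      · simp only [if_neg h2]
        have hmax : max mx a = mx := by omega
        have hmin : min mn a = mn := by omega
        rw [hmax, hmin]
        exact ih mx mn h

-- ===== VERDICT (by name: the statement is the Claim_ definition above) =====
theorem max_tuple_spec : Claim_equal_max_tuple := by
  intro tupleA _ hpre
  unfold Spec_max_tuple
  match tupleA, hpre with
  | h :: t, _ =>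
    unfold max_tuple max_tuple_alt
    rw [PySem.List.max?_id_cons, PySem.List.min?_id_cons]
    simp only [List.foldl_cons]
    have step1 : (if h > h then (h, h) else if h < h then (h, h) else ((h, h) : Int × Int)) = (h, h) := by
      simp
    rw [step1, fused_fold_eq t h h le_rfl]
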